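-- pv_equiv track=rewrite | github.com/majakolar/rhythmic-gymnastics_automatic-analysis | src/rg_ai/utils/utils_annotations.py | get_label_from_filename
-- ===== SOURCE A (Python) =====
-- def get_label_from_filename(
--     filename: str,
--     main_label_index: int = 0,
--     use_sublabels: bool = False,
--     joined_label_dict: dict = None,
--     use_consolidation: bool = False,
--     consolidation_map: dict = None,
--     other_check: bool = False,
--     fallback_general: bool = False,
--     get_only_sublabel: bool = False,
--     check_person_suffix: bool = True,
--     ) -> str:
--     """
--     Unified function to extract labels from filenames.
--
--     Args:
--         filename: The filename to extract label from
--         main_label_index: Index position to extract main label from split filename (0 for embedding files, 2 for video names)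
--         use_sublabels: Whether to use sublabel extraction
--         joined_label_dict: Dictionary mapping main labels to their sublabels
--         use_consolidation: Whether to apply label consolidation
--         consolidation_map: Mapping for consolidated labels
--         other_check: Whether to check for "Other" category first
--         fallback_general: Whether to fallback to "GENERAL" instead of raising error
--
--     Returns:
--         Extracted label string
--     """
--     # checks for "Other" category first if enabled
--     if other_check and ("_Other_" in filename or "_other" in filename):
--         return "Other"
--
--     main_label = filename.split("_")[main_label_index]
--
--     if not use_sublabels or not joined_label_dict:
--         return main_label
--
--     sublabels = joined_label_dict.get(main_label, [])
--     if not sublabels: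
--         return main_label
--
--     # sublabels by length (longest first) for better matching
--     sorted_sublabels = sorted(sublabels, key=len, reverse=True)
--
--     for sublabel in sorted_sublabels:
--         check_subtype_suffix = f"{main_label}_{sublabel}_person" if check_person_suffix else f"{main_label}_{sublabel}"
--         if fallback_general and sublabel == "GENERAL":
--             continue
--
--         if check_subtype_suffix in filename:
--             if use_consolidation and consolidation_map:
--                 consolidated = consolidation_map.get(main_label, {}).get(sublabel)
--                 if consolidated == "GENERAL":
--                     return f"{main_label}"
--                 return f"{main_label}_{consolidated}" if consolidated else f"{main_label}_{sublabel}"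
--
--             if sublabel == "GENERAL":
--                 return f"{main_label}"
--             return f"{main_label}_{sublabel}"
--
--     if fallback_general:
--         return "GENERAL"
--
--     raise ValueError(f"Sublabel for {filename} not found in joined_label_dict")
-- ===== SOURCE B (Python) =====
-- def get_label_from_filename(
--     filename: str,
--     main_label_index: int = 0,
--     use_sublabels: bool = False,
--     joined_label_dict: dict = None,
--     use_consolidation: bool = False,
--     consolidation_map: dict = None,
--     other_check: bool = False,
--     fallback_general: bool = False,
--     get_only_sublabel: bool = False,
--     check_person_suffix: bool = True,
-- ) -> str:
--     if other_check and ("_Other_" in filename or "_other" in filename):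
--         return "Other"
--
--     main_label = filename.split("_")[main_label_index]
--     sublabels = joined_label_dict.get(main_label, []) if (use_sublabels and joined_label_dict) else []
--     if not sublabels:
--         return main_label
--
--     # filter the applicable sublabels, then take the longest (first among ties, like max)
--     suffix = "_person" if check_person_suffix else ""
--     candidates = [s for s in sublabels
--                   if not (fallback_general and s == "GENERAL")
--                   and f"{main_label}_{s}{suffix}" in filename]
--     if not candidates:
--         if fallback_general:
--             return "GENERAL"
--         raise ValueError(f"Sublabel for {filename} not found in joined_label_dict")
--
--     best = max(candidates, key=len)
--     if use_consolidation and consolidation_map: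
--         c = consolidation_map.get(main_label, {}).get(best)
--         if c == "GENERAL":
--             return main_label
--         return f"{main_label}_{c or best}"
--     return main_label if best == "GENERAL" else f"{main_label}_{best}"
-- ===== Notes on version B (the rewrite author's own statement) =====
-- stated objective: simpler
-- what changed: Replaces the sort-by-length-then-return-on-first-match loop with a declarative filter of the matching sublabels (a list comprehension) followed by max(candidates, key=len), and a single staged output block instead of the in-loop return ladder.
import Mathlib
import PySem

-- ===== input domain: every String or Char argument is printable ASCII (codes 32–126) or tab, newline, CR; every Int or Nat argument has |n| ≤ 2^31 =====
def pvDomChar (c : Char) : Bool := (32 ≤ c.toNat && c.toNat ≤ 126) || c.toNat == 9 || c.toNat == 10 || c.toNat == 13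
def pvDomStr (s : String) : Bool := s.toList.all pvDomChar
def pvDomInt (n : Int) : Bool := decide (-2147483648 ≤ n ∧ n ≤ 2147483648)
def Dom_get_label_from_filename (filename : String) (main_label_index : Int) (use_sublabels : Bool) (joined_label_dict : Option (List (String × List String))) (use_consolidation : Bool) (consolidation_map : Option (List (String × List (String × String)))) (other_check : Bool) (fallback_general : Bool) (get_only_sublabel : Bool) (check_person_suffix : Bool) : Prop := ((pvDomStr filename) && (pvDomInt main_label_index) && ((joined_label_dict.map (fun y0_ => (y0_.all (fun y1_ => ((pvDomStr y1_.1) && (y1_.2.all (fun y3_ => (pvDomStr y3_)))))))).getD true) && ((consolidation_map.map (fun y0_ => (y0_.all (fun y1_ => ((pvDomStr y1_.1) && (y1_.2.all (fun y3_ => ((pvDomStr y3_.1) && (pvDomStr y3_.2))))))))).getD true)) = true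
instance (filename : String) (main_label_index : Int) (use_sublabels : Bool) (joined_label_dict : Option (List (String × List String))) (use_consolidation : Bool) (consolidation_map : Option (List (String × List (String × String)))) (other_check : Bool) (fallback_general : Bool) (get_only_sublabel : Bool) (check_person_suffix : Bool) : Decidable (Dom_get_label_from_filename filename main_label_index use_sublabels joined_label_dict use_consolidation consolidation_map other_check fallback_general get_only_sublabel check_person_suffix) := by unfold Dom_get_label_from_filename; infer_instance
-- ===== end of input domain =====

-- B replaces A's sort-by-length-then-first-match scan with a filter of the matching
-- sublabels followed by max(…, key=len) (objective: simpler); A and B agree exactly.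


-- ===== PORT A =====
-- A's for-loop over the length-sorted sublabels: skip GENERAL under fallback_general,
-- on the first substring match return the emitted label (Python's early return),
-- none when the loop falls through.
def aLoop (filename ml : String) (uc : Bool) (cmapL : List (String × List (String × String))) (fg cps : Bool) : List String → Option String
  | [] => none
  | sub :: rest =>
    let needle := if cps then ml ++ "_" ++ sub ++ "_person" else ml ++ "_" ++ sub
    if fg && sub == "GENERAL" then aLoop filename ml uc cmapL fg cps rest
    else if PySem.Str.isIn needle filename then
      some (if uc && !cmapL.isEmpty then
              match PySem.Dict.get? (PySem.Dict.mk (PySem.Dict.getD (PySem.Dict.mk cmapL) ml [])) sub with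
              | some c => if c == "GENERAL" then ml else if c == "" then ml ++ "_" ++ sub else ml ++ "_" ++ c
              | none => ml ++ "_" ++ sub
            else if sub == "GENERAL" then ml else ml ++ "_" ++ sub)
    else aLoop filename ml uc cmapL fg cps rest

def get_label_from_filename (filename : String) (main_label_index : Int) (use_sublabels : Bool) (joined_label_dict : Option (List (String × List String))) (use_consolidation : Bool) (consolidation_map : Option (List (String × List (String × String)))) (other_check : Bool) (fallback_general : Bool) (get_only_sublabel : Bool) (check_person_suffix : Bool) : String :=
  if other_check && (PySem.Str.isIn "_Other_" filename || PySem.Str.isIn "_other" filename) then "Other"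
  else
    let parts := (PySem.Str.split? filename "_").getD []
    let main_label := PySem.List.pyGetD parts main_label_index ""   -- IndexError excluded by Pre_
    let jldL := joined_label_dict.getD []
    if !use_sublabels || jldL.isEmpty then main_label
    else
      let sublabels := PySem.Dict.getD (PySem.Dict.mk jldL) main_label []
      if sublabels.isEmpty then main_label
      else
        match aLoop filename main_label use_consolidation (consolidation_map.getD []) fallback_general check_person_suffix
                (PySem.List.sorted sublabels (fun s => PySem.Str.len s) true) with
        | some out => out
        | none => if fallback_general then "GENERAL" else ""     -- ValueError: excluded by Pre_

-- ===== PORT B =====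
-- Source B: filter the applicable sublabels (list comprehension → List.filter), take the
-- longest with max(…, key=len) → PySem.List.max?, then one staged output block.
def get_label_from_filename_alt (filename : String) (main_label_index : Int) (use_sublabels : Bool) (joined_label_dict : Option (List (String × List String))) (use_consolidation : Bool) (consolidation_map : Option (List (String × List (String × String)))) (other_check : Bool) (fallback_general : Bool) (get_only_sublabel : Bool) (check_person_suffix : Bool) : String :=
  if other_check && (PySem.Str.isIn "_Other_" filename || PySem.Str.isIn "_other" filename) then "Other"
  else
    let main_label := PySem.List.pyGetD ((PySem.Str.split? filename "_").getD []) main_label_index ""   -- IndexError excluded by Pre_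
    let sublabels := if use_sublabels && !(joined_label_dict.getD []).isEmpty
                     then PySem.Dict.getD (PySem.Dict.mk (joined_label_dict.getD [])) main_label []
                     else []
    if sublabels.isEmpty then main_label
    else
      let sfx := if check_person_suffix then "_person" else ""
      let candidates := sublabels.filter (fun s =>
        !(fallback_general && s == "GENERAL") && PySem.Str.isIn (main_label ++ "_" ++ s ++ sfx) filename)
      match PySem.List.max? candidates (fun s => PySem.Str.len s) with
      | none => if fallback_general then "GENERAL" else ""   -- ValueError: excluded by Pre_
      | some best =>
        if use_consolidation && !(consolidation_map.getD []).isEmpty then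
          match PySem.Dict.get? (PySem.Dict.mk (PySem.Dict.getD (PySem.Dict.mk (consolidation_map.getD [])) main_label [])) best with
          | some c => if c == "GENERAL" then main_label else main_label ++ "_" ++ (if c == "" then best else c)
          | none => main_label ++ "_" ++ best
        else if best == "GENERAL" then main_label else main_label ++ "_" ++ best

-- ===== PRECONDITION & SPEC =====
-- Pre_ excludes exactly the inputs where the Python raises (B raises there too):
-- IndexError when main_label_index is out of range of filename.split("_"), and
-- ValueError when sublabels apply but none matches and fallback_general is false.
def Pre_get_label_from_filename (filename : String) (main_label_index : Int) (use_sublabels : Bool) (joined_label_dict : Option (List (String × List String))) (use_consolidation : Bool) (consolidation_map : Option (List (String × List (String × String)))) (other_check : Bool) (fallback_general : Bool) (get_only_sublabel : Bool) (check_person_suffix : Bool) : Prop :=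
  (other_check && (PySem.Str.isIn "_Other_" filename || PySem.Str.isIn "_other" filename)) = true ∨
  (PySem.Raise.InRange ((PySem.Str.split? filename "_").getD []).length main_label_index ∧
    (use_sublabels = true →
     joined_label_dict.getD [] ≠ [] →
     PySem.Dict.getD (PySem.Dict.mk (joined_label_dict.getD [])) (PySem.List.pyGetD ((PySem.Str.split? filename "_").getD []) main_label_index "") [] ≠ [] →
     (fallback_general = true ∨
      ∃ sub ∈ PySem.Dict.getD (PySem.Dict.mk (joined_label_dict.getD [])) (PySem.List.pyGetD ((PySem.Str.split? filename "_").getD []) main_label_index "") [],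
        PySem.Str.isIn
          (if check_person_suffix
           then PySem.List.pyGetD ((PySem.Str.split? filename "_").getD []) main_label_index "" ++ "_" ++ sub ++ "_person"
           else PySem.List.pyGetD ((PySem.Str.split? filename "_").getD []) main_label_index "" ++ "_" ++ sub) filename = true)))
instance (filename : String) (main_label_index : Int) (use_sublabels : Bool) (joined_label_dict : Option (List (String × List String))) (use_consolidation : Bool) (consolidation_map : Option (List (String × List (String × String)))) (other_check : Bool) (fallback_general : Bool) (get_only_sublabel : Bool) (check_person_suffix : Bool) : Decidable (Pre_get_label_from_filename filename main_label_index use_sublabels joined_label_dict use_consolidation consolidation_map other_check fallback_general get_only_sublabel check_person_suffix) := by unfold Pre_get_label_from_filename; infer_instance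

def pvWitness_get_label_from_filename : String × Int × Bool × (Option (List (String × List String))) × Bool × (Option (List (String × List (String × String)))) × Bool × Bool × Bool × Bool :=
  ("a", 0, false, none, false, none, false, false, false, true)

def Spec_get_label_from_filename (filename : String) (main_label_index : Int) (use_sublabels : Bool) (joined_label_dict : Option (List (String × List String))) (use_consolidation : Bool) (consolidation_map : Option (List (String × List (String × String)))) (other_check : Bool) (fallback_general : Bool) (get_only_sublabel : Bool) (check_person_suffix : Bool) (out : String) : Prop := out = get_label_from_filename_alt filename main_label_index use_sublabels joined_label_dict use_consolidation consolidation_map other_check fallback_general get_only_sublabel check_person_suffix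
instance (filename : String) (main_label_index : Int) (use_sublabels : Bool) (joined_label_dict : Option (List (String × List String))) (use_consolidation : Bool) (consolidation_map : Option (List (String × List (String × String)))) (other_check : Bool) (fallback_general : Bool) (get_only_sublabel : Bool) (check_person_suffix : Bool) (out : String) : Decidable (Spec_get_label_from_filename filename main_label_index use_sublabels joined_label_dict use_consolidation consolidation_map other_check fallback_general get_only_sublabel check_person_suffix out) := by unfold Spec_get_label_from_filename; infer_instance

-- ===== CLAIM (what is proved, stated in full; the proofs are below) =====
def Claim_equal_get_label_from_filename : Prop := ∀ (filename : String) (main_label_index : Int) (use_sublabels : Bool) (joined_label_dict : Option (List (String × List String))) (use_consolidation : Bool) (consolidation_map : Option (List (String × List (String × String)))) (other_check : Bool) (fallback_general : Bool) (get_only_sublabel : Bool) (check_person_suffix : Bool), Dom_get_label_from_filename filename main_label_index use_sublabels joined_label_dict use_consolidation consolidation_map other_check fallback_general get_only_sublabel check_person_suffix → Pre_get_label_from_filename filename main_label_index use_sublabels joined_label_dict use_consolidation consolidation_map other_check fallback_general get_only_sublabel check_person_suffix → Spec_get_label_from_filename filename main_label_index use_sublabels joined_label_dict use_consolidation consolidation_map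 other_check fallback_general get_only_sublabel check_person_suffix (get_label_from_filename filename main_label_index use_sublabels joined_label_dict use_consolidation consolidation_map other_check fallback_general get_only_sublabel check_person_suffix)

-- ===== LEMMAS AND PROOFS =====

-- the match-and-not-skipped predicate that A's loop tests (after sorting)
def pMatch (filename ml : String) (fg cps : Bool) (sub : String) : Bool :=
  !(fg && sub == "GENERAL") &&
  PySem.Str.isIn (if cps then ml ++ "_" ++ sub ++ "_person" else ml ++ "_" ++ sub) filename

-- A's output block, as a function of the chosen sublabel
def emitA (ml sub : String) (uc : Bool) (cm : List (String × List (String × String))) : String :=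
  if uc && !cm.isEmpty then
    match PySem.Dict.get? (PySem.Dict.mk (PySem.Dict.getD (PySem.Dict.mk cm) ml [])) sub with
    | some c => if c == "GENERAL" then ml else if c == "" then ml ++ "_" ++ sub else ml ++ "_" ++ c
    | none => ml ++ "_" ++ sub
  else if sub == "GENERAL" then ml else ml ++ "_" ++ sub

theorem aLoop_eq_find (f ml : String) (uc : Bool) (cm : List (String × List (String × String))) (fg cps : Bool) (l : List String) :
    aLoop f ml uc cm fg cps l = (l.find? (pMatch f ml fg cps)).map (fun s => emitA ml s uc cm) := by
  induction l with
  | nil => rfl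
  | cons sub rest ih =>
    by_cases h1 : (fg && sub == "GENERAL") = true
    · simp [aLoop, h1, pMatch, ih]
    · by_cases h2 : PySem.Chars.isIn ((if cps then ml ++ "_" ++ sub ++ "_person" else ml ++ "_" ++ sub) : String).toList f.toList = true
      · simp [aLoop, h1, h2, pMatch, emitA]
      · simp [aLoop, h1, h2, pMatch, ih]

-- inserting x into a list sorted descending by key: where find? lands
theorem find?_insertBy {α : Type} (key : α → Int) (p : α → Bool) (x : α) (l : List α)
    (h : l.Pairwise (fun a b => key b ≤ key a)) :
    List.find? p (PySem.List.insertBy (fun a b => decide (key b < key a)) x l) =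
      match List.find? p l with
      | none => if p x then some x else none
      | some b => if p x && decide (key b < key x) then some x else some b := by
  induction l with
  | nil =>
    simp [PySem.List.insertBy, List.find?]
  | cons y ys ih =>
    have h1 : ∀ z ∈ ys, key z ≤ key y := (List.pairwise_cons.mp h).1
    have h2 : ys.Pairwise (fun a b => key b ≤ key a) := (List.pairwise_cons.mp h).2
    by_cases hlt : key y < key x
    · simp only [PySem.List.insertBy, hlt, decide_true, if_true]
      by_cases hp : p x = true
      · cases hfy : List.find? p (y :: ys) with
        | none => simp [hp, hfy]
        | some b =>
          have hb : b ∈ y :: ys := List.mem_of_find?_eq_some hfy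
          have hble : key b ≤ key y := by
            rcases List.mem_cons.mp hb with rfl | hbm
            · exact le_refl _
            · exact h1 _ hbm
          have : key b < key x := lt_of_le_of_lt hble hlt
          simp [hp, this]
      · have hp' : p x = false := by revert hp; cases p x <;> simp
        cases hfy : List.find? p (y :: ys) with
        | none => simp [hp', hfy]
        | some b => simp [hp', hfy]
    · simp only [PySem.List.insertBy, hlt, decide_false, Bool.false_eq_true, if_false]
      by_cases hpy : p y = true
      · have : ¬ (key y < key x) := hlt
        simp [hpy, this]
      · have hpy' : p y = false := by revert hpy; cases p y <;> simp
        simp only [List.find?_cons, hpy', ih h2]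

theorem sorted_rev_append_singleton {α : Type} (l : List α) (x : α) (key : α → Int) :
    PySem.List.sorted (l ++ [x]) key true =
      PySem.List.insertBy (fun a b => decide (key b < key a)) x (PySem.List.sorted l key true) := by
  simp [PySem.List.sorted_rev_eq_foldl_insertBy, List.foldl_append]

theorem max?_append_singleton {α : Type} (ys : List α) (x : α) (key : α → Int) :
    PySem.List.max? (ys ++ [x]) key =
      match PySem.List.max? ys key with
      | none => some x
      | some m => if key m < key x then some x else some m := by
  simp only [PySem.List.max?, List.foldl_append, List.foldl_cons, List.foldl_nil]
  rfl

-- A's find-first over the length-sorted list IS B's max-by-length over the filtered list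
theorem find?_sorted_eq_max?_filter {α : Type} (key : α → Int) (p : α → Bool) (l : List α) :
    List.find? p (PySem.List.sorted l key true) = PySem.List.max? (l.filter p) key := by
  induction l using List.reverseRecOn with
  | nil => rfl
  | append_singleton l x ih =>
    rw [sorted_rev_append_singleton, find?_insertBy key p x _ (PySem.List.sorted_pairwise_rev l _), ih,
        List.filter_append]
    by_cases hp : p x = true
    · have hx : [x].filter p = [x] := by simp [hp]
      rw [hx, max?_append_singleton]
      cases hm : PySem.List.max? (l.filter p) key with
      | none => simp [hp]
      | some b => by_cases hlt : key b < key x <;> simp [hp, hlt]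
    · have hx : [x].filter p = [] := by simp [hp]
      rw [hx, List.append_nil]
      cases hm : PySem.List.max? (l.filter p) key with
      | none => simp [hp]
      | some b => simp [hp]

theorem pred_eq_pMatch (f ml : String) (fg cps : Bool) :
    (fun s => !(fg && s == "GENERAL") &&
        PySem.Str.isIn (ml ++ "_" ++ s ++ (if cps then "_person" else "")) f) = pMatch f ml fg cps := by
  funext s
  cases cps
  · simp [pMatch, String.append_empty]
  · rfl

theorem emitB_eq_emitA (ml best : String) (uc : Bool) (cm : List (String × List (String × String))) :
    (if uc && !cm.isEmpty then
      match PySem.Dict.get? (PySem.Dict.mk (PySem.Dict.getD (PySem.Dict.mk cm) ml [])) best with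
      | some c => if c == "GENERAL" then ml else ml ++ "_" ++ (if c == "" then best else c)
      | none => ml ++ "_" ++ best
     else if best == "GENERAL" then ml else ml ++ "_" ++ best) = emitA ml best uc cm := by
  unfold emitA
  by_cases h : (uc && !cm.isEmpty) = true
  · rw [if_pos h, if_pos h]
    cases PySem.Dict.get? (PySem.Dict.mk (PySem.Dict.getD (PySem.Dict.mk cm) ml [])) best with
    | none => rfl
    | some c =>
      dsimp only
      split_ifs <;> rfl
  · have h' : (uc && !cm.isEmpty) = false := by
      cases huc : (uc && !cm.isEmpty)
      · rfl
      · exact absurd huc h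
    rw [h']
    rfl

theorem map_match_emit (o : Option String) (f : String → String) (e : String) :
    (match o.map f with | some out => out | none => e) = (match o with | some b => f b | none => e) := by
  cases o <;> rfl

theorem core_eq (f ml : String) (uc : Bool) (cm : List (String × List (String × String))) (fg cps : Bool) (subl : List String) :
    (match aLoop f ml uc cm fg cps (PySem.List.sorted subl (fun s => PySem.Str.len s) true) with
     | some out => out
     | none => if fg then "GENERAL" else "") =
    (match PySem.List.max? (subl.filter (fun s =>
        !(fg && s == "GENERAL") && PySem.Str.isIn (ml ++ "_" ++ s ++ (if cps then "_person" else "")) f))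
        (fun s => PySem.Str.len s) with
     | none => if fg then "GENERAL" else ""
     | some best =>
       if uc && !cm.isEmpty then
         match PySem.Dict.get? (PySem.Dict.mk (PySem.Dict.getD (PySem.Dict.mk cm) ml [])) best with
         | some c => if c == "GENERAL" then ml else ml ++ "_" ++ (if c == "" then best else c)
         | none => ml ++ "_" ++ best
       else if best == "GENERAL" then ml else ml ++ "_" ++ best) := by
  rw [aLoop_eq_find, pred_eq_pMatch, find?_sorted_eq_max?_filter, map_match_emit]
  cases PySem.List.max? (subl.filter (pMatch f ml fg cps)) (fun s => PySem.Str.len s) with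
  | none => rfl
  | some best => exact (emitB_eq_emitA ml best uc cm).symm

-- ===== VERDICT (by name: the statement is the Claim_ definition above) =====
theorem get_label_from_filename_spec : Claim_equal_get_label_from_filename := by
  intro filename main_label_index use_sublabels joined_label_dict use_consolidation consolidation_map
    other_check fallback_general get_only_sublabel check_person_suffix _hdom _hpre
  unfold Spec_get_label_from_filename get_label_from_filename get_label_from_filename_alt
  by_cases hoc : (other_check && (PySem.Str.isIn "_Other_" filename || PySem.Str.isIn "_other" filename)) = true
  · simp only [hoc, if_true]
  · rw [if_neg hoc, if_neg hoc]
    dsimp only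
    by_cases hus : use_sublabels = true
    · by_cases hje : (joined_label_dict.getD []).isEmpty = true
      · simp [hus, hje]
      · have hA : ¬(!use_sublabels || (joined_label_dict.getD []).isEmpty) = true := by simp [hus, hje]
        have hB : (use_sublabels && !(joined_label_dict.getD []).isEmpty) = true := by simp [hus, hje]
        rw [if_neg hA, if_pos hB]
        by_cases hse : (PySem.Dict.getD (PySem.Dict.mk (joined_label_dict.getD []))
            (PySem.List.pyGetD ((PySem.Str.split? filename "_").getD []) main_label_index "") []).isEmpty = true
        · rw [if_pos hse, if_pos hse]
        · rw [if_neg hse, if_neg hse]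
          exact core_eq filename
            (PySem.List.pyGetD ((PySem.Str.split? filename "_").getD []) main_label_index "")
            use_consolidation (consolidation_map.getD []) fallback_general check_person_suffix
            (PySem.Dict.getD (PySem.Dict.mk (joined_label_dict.getD []))
              (PySem.List.pyGetD ((PySem.Str.split? filename "_").getD []) main_label_index "") [])
    · simp [hus]
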